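-- pv_equiv track=rewrite | github.com/mvkma/advent-of-code-2022 | 23.py | check_move_dir
-- ===== SOURCE A (Python) =====
-- def check_move_dir(pos, elves, d):
--     xx, yy = pos
--     match d:
--         case "N":
--             to_check = {(xx, yy - 1), (xx + 1, yy - 1), (xx - 1, yy - 1)}
--             new_pos = (xx, yy - 1)
--         case "S":
--             to_check = {(xx, yy + 1), (xx + 1, yy + 1), (xx - 1, yy + 1)}
--             new_pos = (xx, yy + 1)
--         case "E":
--             to_check = {(xx + 1, yy), (xx + 1, yy - 1), (xx + 1, yy + 1)}
--             new_pos = (xx + 1, yy)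
--         case "W":
--             to_check = {(xx - 1, yy), (xx - 1, yy - 1), (xx - 1, yy + 1)}
--             new_pos = (xx - 1, yy)
--         case _:
--             raise ValueError(f"Unknown direction: {d}")
--
--     if any(p in elves for p in to_check):
--         return False, None
--     else:
--         return True, new_pos
-- ===== SOURCE B (Python) =====
-- def check_move_dir(pos, elves, d):
--     # Single pass over the elves: an elf blocks the move iff it lies on the
--     # target line one step away in direction d, within distance 1 along the
--     # perpendicular axis.
--     if d == "N":
--         dx, dy = 0, -1
--     elif d == "S":
--         dx, dy = 0, 1
--     elif d == "E":
--         dx, dy = 1, 0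
--     elif d == "W":
--         dx, dy = -1, 0
--     else:
--         raise ValueError(f"Unknown direction: {d}")
--     xx, yy = pos
--     if dx == 0:
--         blocked = any(ey == yy + dy and abs(ex - xx) <= 1 for ex, ey in elves)
--     else:
--         blocked = any(ex == xx + dx and abs(ey - yy) <= 1 for ex, ey in elves)
--     if blocked:
--         return False, None
--     return True, (xx + dx, yy + dy)
-- ===== Notes on version B (the rewrite author's own statement) =====
-- stated objective: alternative
-- what changed: Instead of building the three candidate cells and testing each for membership in elves (three scans of the list), B makes one pass over the elves and tests each elf against an arithmetic band predicate: it blocks iff it lies on the target line one step in direction d and within distance 1 along the perpendicular axis.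
import Mathlib
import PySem

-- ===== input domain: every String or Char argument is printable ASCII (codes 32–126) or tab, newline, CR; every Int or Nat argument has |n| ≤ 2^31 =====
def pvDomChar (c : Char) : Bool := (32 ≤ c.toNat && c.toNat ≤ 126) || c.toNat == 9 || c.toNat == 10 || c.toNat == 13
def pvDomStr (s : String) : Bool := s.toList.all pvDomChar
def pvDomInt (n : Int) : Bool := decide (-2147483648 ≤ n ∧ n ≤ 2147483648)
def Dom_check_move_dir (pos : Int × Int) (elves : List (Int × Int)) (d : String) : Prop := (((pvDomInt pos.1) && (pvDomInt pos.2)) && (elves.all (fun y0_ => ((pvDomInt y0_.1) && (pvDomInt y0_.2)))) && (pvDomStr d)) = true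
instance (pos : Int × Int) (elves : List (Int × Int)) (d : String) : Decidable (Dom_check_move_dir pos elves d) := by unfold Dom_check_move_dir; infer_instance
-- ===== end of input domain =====

-- B replaces A's test of three constructed cells against the elves list by a single pass
-- over the elves with an arithmetic band predicate (objective: alternative).

-- ===== PORT A =====
-- A raises ValueError on any d outside {"N","S","E","W"}; those inputs are excluded by
-- Pre_check_move_dir, and the port returns a dummy (false, none) there.
def check_move_dir (pos : Int × Int) (elves : List (Int × Int)) (d : String) : Bool × (Option (Int × Int)) :=
  let xx := pos.1
  let yy := pos.2
  if d = "N" then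
    let to_check : PySem.Set (Int × Int) := PySem.Set.ofList [(xx, yy - 1), (xx + 1, yy - 1), (xx - 1, yy - 1)]
    let new_pos := (xx, yy - 1)
    if to_check.any (fun p => elves.contains p) then (false, none) else (true, some new_pos)
  else if d = "S" then
    let to_check : PySem.Set (Int × Int) := PySem.Set.ofList [(xx, yy + 1), (xx + 1, yy + 1), (xx - 1, yy + 1)]
    let new_pos := (xx, yy + 1)
    if to_check.any (fun p => elves.contains p) then (false, none) else (true, some new_pos)
  else if d = "E" then
    let to_check : PySem.Set (Int × Int) := PySem.Set.ofList [(xx + 1, yy), (xx + 1, yy - 1), (xx + 1, yy + 1)]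
    let new_pos := (xx + 1, yy)
    if to_check.any (fun p => elves.contains p) then (false, none) else (true, some new_pos)
  else if d = "W" then
    let to_check : PySem.Set (Int × Int) := PySem.Set.ofList [(xx - 1, yy), (xx - 1, yy - 1), (xx - 1, yy + 1)]
    let new_pos := (xx - 1, yy)
    if to_check.any (fun p => elves.contains p) then (false, none) else (true, some new_pos)
  else (false, none)  -- raise ValueError in Python; outside Pre_

-- ===== PORT B =====
def check_move_dir_alt (pos : Int × Int) (elves : List (Int × Int)) (d : String) : Bool × (Option (Int × Int)) :=
  let delta : Option (Int × Int) :=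
    if d = "N" then some (0, -1)
    else if d = "S" then some (0, 1)
    else if d = "E" then some (1, 0)
    else if d = "W" then some (-1, 0)
    else none  -- raise ValueError in Python; outside Pre_
  match delta with
  | none => (false, none)
  | some (dx, dy) =>
    let xx := pos.1
    let yy := pos.2
    let blocked :=
      if dx = 0 then
        elves.any (fun e => e.2 == yy + dy && decide (|e.1 - xx| ≤ 1))
      else
        elves.any (fun e => e.1 == xx + dx && decide (|e.2 - yy| ≤ 1))
    if blocked then (false, none) else (true, some (xx + dx, yy + dy))

-- ===== PRECONDITION & SPEC =====
-- Pre_ excludes exactly the directions on which both Pythons raise ValueError.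
def Pre_check_move_dir (pos : Int × Int) (elves : List (Int × Int)) (d : String) : Prop :=
  d = "N" ∨ d = "S" ∨ d = "E" ∨ d = "W"
instance (pos : Int × Int) (elves : List (Int × Int)) (d : String) : Decidable (Pre_check_move_dir pos elves d) := by unfold Pre_check_move_dir; infer_instance

def pvWitness_check_move_dir : (Int × Int) × (List (Int × Int)) × String := ((0, 0), [(1, 1)], "N")

def Spec_check_move_dir (pos : Int × Int) (elves : List (Int × Int)) (d : String) (out : Bool × (Option (Int × Int))) : Prop := out = check_move_dir_alt pos elves d
instance (pos : Int × Int) (elves : List (Int × Int)) (d : String) (out : Bool × (Option (Int × Int))) : Decidable (Spec_check_move_dir pos elves d out) := by unfold Spec_check_move_dir; infer_instance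

-- ===== CLAIM (what is proved, stated in full; the proofs are below) =====
def Claim_equal_check_move_dir : Prop := ∀ (pos : Int × Int) (elves : List (Int × Int)) (d : String), Dom_check_move_dir pos elves d → Pre_check_move_dir pos elves d → Spec_check_move_dir pos elves d (check_move_dir pos elves d)

-- ===== LEMMAS AND PROOFS =====

theorem any_dedup {α : Type} [BEq α] [LawfulBEq α] (xs : List α) (p : α → Bool) :
    (PySem.List.dedup xs).any p = xs.any p := by
  rcases h : xs.any p with _ | _
  · simp only [List.any_eq_false] at h ⊢
    intro x hx
    exact h x ((PySem.List.mem_dedup _ _).mp hx)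
  · simp only [List.any_eq_true] at h ⊢
    obtain ⟨x, hx, hp⟩ := h
    exact ⟨x, (PySem.List.mem_dedup _ _).mpr hx, hp⟩

-- one scan with a predicate that holds exactly on three cells = three membership tests
theorem any_tri (xs : List (Int × Int)) (p : Int × Int → Bool) (c1 c2 c3 : Int × Int)
    (h : ∀ e, p e = true ↔ (e = c1 ∨ e = c2 ∨ e = c3)) :
    xs.any p = (xs.contains c1 || (xs.contains c2 || xs.contains c3)) := by
  rw [Bool.eq_iff_iff]
  simp only [List.any_eq_true, Bool.or_eq_true, List.contains_eq_mem, decide_eq_true_eq, h]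
  constructor
  · rintro ⟨e, he, rfl | rfl | rfl⟩ <;> tauto
  · rintro (h1 | h1 | h1)
    exacts [⟨c1, h1, Or.inl rfl⟩, ⟨c2, h1, Or.inr (Or.inl rfl)⟩, ⟨c3, h1, Or.inr (Or.inr rfl)⟩]

-- ===== VERDICT (by name: the statement is the Claim_ definition above) =====
set_option maxHeartbeats 1000000 in
theorem check_move_dir_spec : Claim_equal_check_move_dir := by
  intro pos elves d _ hpre
  obtain ⟨xx, yy⟩ := pos
  rcases hpre with h | h | h | h <;> subst h <;>
    simp only [Spec_check_move_dir, check_move_dir, check_move_dir_alt,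
      ← PySem.List.dedup_eq_ofList, any_dedup, String.reduceEq, Int.reduceEq, reduceIte,
      List.any_cons, List.any_nil, Bool.or_false, sub_eq_add_neg, add_zero]
  · rw [any_tri elves _ (xx, yy + (-1)) (xx + 1, yy + (-1)) (xx + (-1), yy + (-1))
      (by rintro ⟨ex, ey⟩; simp [Prod.ext_iff, abs_le]; omega)]
  · rw [any_tri elves _ (xx, yy + 1) (xx + 1, yy + 1) (xx + (-1), yy + 1)
      (by rintro ⟨ex, ey⟩; simp [Prod.ext_iff, abs_le]; omega)]
  · rw [any_tri elves _ (xx + 1, yy) (xx + 1, yy + (-1)) (xx + 1, yy + 1)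
      (by rintro ⟨ex, ey⟩; simp [Prod.ext_iff, abs_le]; omega)]
  · rw [any_tri elves _ (xx + (-1), yy) (xx + (-1), yy + (-1)) (xx + (-1), yy + 1)
      (by rintro ⟨ex, ey⟩; simp [Prod.ext_iff, abs_le]; omega)]
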